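-- pv_equiv track=rewrite | github.com/jam-khan/Quantum_Key_Distribution | july24/optimization.py | generate_classical_expression
-- ===== SOURCE A (Python) =====
-- d = 2
--
-- def generate_classical_expression(A, B):
--     n = d + 1
--     Alice = A
--     Bob   = B
--
--     if d == 0: return []
--
--     S_1111 = S_2211 = S_1112 = S_2212 = S_1212 = 0
--
--     for i in range(2 * n):
--         for j in range(2 * n):
--             x = i // d
--             y = j // d
--             a = i % 2
--             b = j % 2
--
--             if Alice[x] == a and Bob[y] == b:
--                 S_1111 += 1 if x == y and a == b == 0 else 0
--                 S_2211 += 1 if x == y and a == b == 1 else 0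
--                 S_1112 += 1 if x != y and a == b == 0 else 0
--                 S_2212 += 1 if x != y and a == b == 1 else 0
--                 S_1212 += 1 if x != y and a != b else 0
--
--     return S_1111, S_2211, S_1112, S_1212, S_2212
-- ===== SOURCE B (Python) =====
-- def generate_classical_expression(A, B):
--     S_1111 = S_2211 = S_1112 = S_2212 = S_1212 = 0
--     for x in range(3):
--         a = A[x]
--         if a != 0 and a != 1:
--             continue
--         for y in range(3):
--             b = B[y]
--             if b != 0 and b != 1:
--                 continue
--             if x == y:
--                 if a == b:
--                     if a == 0:
--                         S_1111 += 1
--                     else: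
--                         S_2211 += 1
--             elif a == b:
--                 if a == 0:
--                     S_1112 += 1
--                 else:
--                     S_2212 += 1
--             else:
--                 S_1212 += 1
--     return S_1111, S_2211, S_1112, S_1212, S_2212
-- ===== Notes on version B (the rewrite author's own statement) =====
-- stated objective: simpler
-- what changed: Replaces A's 6x6 loop over encoded indices (x=i//2, a=i%2) by a direct 3x3 loop over (x, y) that reads Alice[x] and Bob[y] once, skips entries outside {0,1}, and bumps exactly one of the five counters via an if-tree.
import Mathlib
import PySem

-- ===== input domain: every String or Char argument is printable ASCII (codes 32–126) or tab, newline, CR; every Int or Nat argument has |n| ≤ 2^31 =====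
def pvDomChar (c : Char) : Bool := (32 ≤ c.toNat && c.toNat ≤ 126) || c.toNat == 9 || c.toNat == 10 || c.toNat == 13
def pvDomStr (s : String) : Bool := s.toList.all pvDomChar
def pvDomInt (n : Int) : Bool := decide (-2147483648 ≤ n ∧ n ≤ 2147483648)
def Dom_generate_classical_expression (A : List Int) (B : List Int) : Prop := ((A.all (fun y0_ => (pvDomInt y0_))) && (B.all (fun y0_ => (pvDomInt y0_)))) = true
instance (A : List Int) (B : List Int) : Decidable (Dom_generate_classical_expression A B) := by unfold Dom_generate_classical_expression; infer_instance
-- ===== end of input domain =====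

-- B replaces A's 6×6 loop with div/mod index decoding by a direct 3×3 loop over (x, y)
-- reading Alice[x]/Bob[y] once; objective: simpler (same result, fewer iterations, no index arithmetic).
-- ===== PORT A =====
-- Python's `if d == 0: return []` is unreachable (the module constant d is 2); omitted.
def generate_classical_expression (A : List Int) (B : List Int) : Int × Int × Int × Int × Int :=
  let d : Int := 2
  let n : Int := d + 1
  let r :=
    (PySem.List.pyRange 0 (2 * n) 1).foldl (fun s i =>
      (PySem.List.pyRange 0 (2 * n) 1).foldl (fun s j =>
        let x := PySem.Int.floordiv i d
        let y := PySem.Int.floordiv j d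
        let a := PySem.Int.mod i 2
        let b := PySem.Int.mod j 2
        if PySem.List.pyGetD A x 0 = a ∧ PySem.List.pyGetD B y 0 = b then
          (s.1 + (if x = y ∧ a = 0 ∧ b = 0 then 1 else 0),
           s.2.1 + (if x = y ∧ a = 1 ∧ b = 1 then 1 else 0),
           s.2.2.1 + (if x ≠ y ∧ a = 0 ∧ b = 0 then 1 else 0),
           s.2.2.2.1 + (if x ≠ y ∧ a = 1 ∧ b = 1 then 1 else 0),
           s.2.2.2.2 + (if x ≠ y ∧ a ≠ b then 1 else 0))
        else s) s)
      ((0, 0, 0, 0, 0) : Int × Int × Int × Int × Int)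
  (r.1, r.2.1, r.2.2.1, r.2.2.2.2, r.2.2.2.1)

-- ===== PORT B =====
def generate_classical_expression_alt (A : List Int) (B : List Int) : Int × Int × Int × Int × Int :=
  let r :=
    (PySem.List.pyRange 0 3 1).foldl (fun s x =>
      let a := PySem.List.pyGetD A x 0
      if a ≠ 0 ∧ a ≠ 1 then s
      else
        (PySem.List.pyRange 0 3 1).foldl (fun s y =>
          let b := PySem.List.pyGetD B y 0
          if b ≠ 0 ∧ b ≠ 1 then s
          else if x = y then
            (if a = b then
              (if a = 0 then (s.1 + 1, s.2.1, s.2.2.1, s.2.2.2.1, s.2.2.2.2)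
               else (s.1, s.2.1 + 1, s.2.2.1, s.2.2.2.1, s.2.2.2.2))
             else s)
          else if a = b then
            (if a = 0 then (s.1, s.2.1, s.2.2.1 + 1, s.2.2.2.1, s.2.2.2.2)
             else (s.1, s.2.1, s.2.2.1, s.2.2.2.1 + 1, s.2.2.2.2))
          else (s.1, s.2.1, s.2.2.1, s.2.2.2.1, s.2.2.2.2 + 1)) s)
      ((0, 0, 0, 0, 0) : Int × Int × Int × Int × Int)
  (r.1, r.2.1, r.2.2.1, r.2.2.2.2, r.2.2.2.1)

-- ===== PRECONDITION & SPEC =====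
-- Pre_: Python A always indexes Alice[0..2] (IndexError on shorter A); Bob[0..2] is indexed
-- unless short-circuited, i.e. short B only raises when some Alice[x] lies in {0,1}.
def Pre_generate_classical_expression (A : List Int) (B : List Int) : Prop :=
  3 ≤ A.length ∧ (3 ≤ B.length ∨
    (¬(A.getD 0 0 = 0 ∨ A.getD 0 0 = 1) ∧ ¬(A.getD 1 0 = 0 ∨ A.getD 1 0 = 1) ∧
     ¬(A.getD 2 0 = 0 ∨ A.getD 2 0 = 1)))
instance (A : List Int) (B : List Int) : Decidable (Pre_generate_classical_expression A B) := by unfold Pre_generate_classical_expression; infer_instance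
def pvWitness_generate_classical_expression : List Int × List Int := ([0, 1, 0], [1, 0, 1])
def Spec_generate_classical_expression (A : List Int) (B : List Int) (out : Int × Int × Int × Int × Int) : Prop := out = generate_classical_expression_alt A B
instance (A : List Int) (B : List Int) (out : Int × Int × Int × Int × Int) : Decidable (Spec_generate_classical_expression A B out) := by unfold Spec_generate_classical_expression; infer_instance

-- ===== CLAIM (what is proved, stated in full; the proofs are below) =====
def Claim_equal_generate_classical_expression : Prop := ∀ (A : List Int) (B : List Int), Dom_generate_classical_expression A B → Pre_generate_classical_expression A B → Spec_generate_classical_expression A B (generate_classical_expression A B)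

-- ===== LEMMAS AND PROOFS =====
-- additive fold over a 5-tuple state splits into componentwise sums
theorem pv_foldl_add5 {α : Type} (g1 g2 g3 g4 g5 : α → Int) (L : List α)
    (s : Int × Int × Int × Int × Int) :
    L.foldl (fun s i => (s.1 + g1 i, s.2.1 + g2 i, s.2.2.1 + g3 i,
        s.2.2.2.1 + g4 i, s.2.2.2.2 + g5 i)) s
      = (s.1 + (L.map g1).sum, s.2.1 + (L.map g2).sum, s.2.2.1 + (L.map g3).sum,
         s.2.2.2.1 + (L.map g4).sum, s.2.2.2.2 + (L.map g5).sum) := by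
  induction L generalizing s with
  | nil => simp
  | cons h t ih => simp [List.foldl_cons, ih, add_assoc]

-- A's guarded 5-way bump as an additive step
theorem pv_stepA (c c1 c2 c3 c4 c5 : Prop) [Decidable c] [Decidable c1] [Decidable c2]
    [Decidable c3] [Decidable c4] [Decidable c5] (s : Int × Int × Int × Int × Int) :
    (if c then
        (s.1 + (if c1 then 1 else 0), s.2.1 + (if c2 then 1 else 0),
         s.2.2.1 + (if c3 then 1 else 0), s.2.2.2.1 + (if c4 then 1 else 0),
         s.2.2.2.2 + (if c5 then 1 else 0))
      else s)
      = (s.1 + (if c ∧ c1 then 1 else 0), s.2.1 + (if c ∧ c2 then 1 else 0),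
         s.2.2.1 + (if c ∧ c3 then 1 else 0), s.2.2.2.1 + (if c ∧ c4 then 1 else 0),
         s.2.2.2.2 + (if c ∧ c5 then 1 else 0)) := by
  split_ifs <;> simp_all

-- B's decision tree as an additive step
theorem pv_stepB (cb cxy cab ca0 : Prop) [Decidable cb] [Decidable cxy] [Decidable cab]
    [Decidable ca0] (s : Int × Int × Int × Int × Int) :
    (if cb then s
     else if cxy then
       (if cab then
         (if ca0 then (s.1 + 1, s.2.1, s.2.2.1, s.2.2.2.1, s.2.2.2.2)
          else (s.1, s.2.1 + 1, s.2.2.1, s.2.2.2.1, s.2.2.2.2))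
        else s)
     else if cab then
       (if ca0 then (s.1, s.2.1, s.2.2.1 + 1, s.2.2.2.1, s.2.2.2.2)
        else (s.1, s.2.1, s.2.2.1, s.2.2.2.1 + 1, s.2.2.2.2))
     else (s.1, s.2.1, s.2.2.1, s.2.2.2.1, s.2.2.2.2 + 1))
    = (s.1 + (if ¬cb ∧ cxy ∧ cab ∧ ca0 then 1 else 0),
       s.2.1 + (if ¬cb ∧ cxy ∧ cab ∧ ¬ca0 then 1 else 0),
       s.2.2.1 + (if ¬cb ∧ ¬cxy ∧ cab ∧ ca0 then 1 else 0),
       s.2.2.2.1 + (if ¬cb ∧ ¬cxy ∧ cab ∧ ¬ca0 then 1 else 0),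
       s.2.2.2.2 + (if ¬cb ∧ ¬cxy ∧ ¬cab then 1 else 0)) := by
  split_ifs <;> simp_all

-- B's outer guard as an additive step
theorem pv_guardB (c : Prop) [Decidable c] (s : Int × Int × Int × Int × Int)
    (t1 t2 t3 t4 t5 : Int) :
    (if c then s else (s.1 + t1, s.2.1 + t2, s.2.2.1 + t3, s.2.2.2.1 + t4, s.2.2.2.2 + t5))
    = (s.1 + (if c then 0 else t1), s.2.1 + (if c then 0 else t2),
       s.2.2.1 + (if c then 0 else t3), s.2.2.2.1 + (if c then 0 else t4),
       s.2.2.2.2 + (if c then 0 else t5)) := by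
  split_ifs <;> simp_all

def pvCls (v : Int) : Fin 3 := if v = 0 then 0 else if v = 1 then 1 else 2

theorem pvCls_eq0 (v : Int) : (v = 0) = (pvCls v = 0) := by
  unfold pvCls; split_ifs with h h1 <;> simp_all
theorem pvCls_eq1 (v : Int) : (v = 1) = (pvCls v = 1) := by
  unfold pvCls; split_ifs with h h1 <;> simp_all
theorem pvCls_eq0' (v : Int) : ((0 : Int) = v) = (pvCls v = 0) :=
  (propext eq_comm).trans (pvCls_eq0 v)
theorem pvCls_eq1' (v : Int) : ((1 : Int) = v) = (pvCls v = 1) :=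
  (propext eq_comm).trans (pvCls_eq1 v)

set_option maxHeartbeats 2000000 in
theorem gce_key (a0 a1 a2 b0 b1 b2 : Int) (ta tb : List Int) :
    generate_classical_expression (a0 :: a1 :: a2 :: ta) (b0 :: b1 :: b2 :: tb)
      = generate_classical_expression_alt (a0 :: a1 :: a2 :: ta) (b0 :: b1 :: b2 :: tb) := by
  have hr6 : PySem.List.pyRange 0 (2 * (2 + 1)) 1 = [0, 1, 2, 3, 4, 5] := by decide
  have hr3 : PySem.List.pyRange 0 3 1 = [0, 1, 2] := by decide
  have ga0 : PySem.List.pyGetD (a0 :: a1 :: a2 :: ta) 0 0 = a0 := by simp [pysem]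
  have ga1 : PySem.List.pyGetD (a0 :: a1 :: a2 :: ta) 1 0 = a1 := by simp [pysem]
  have ga2 : PySem.List.pyGetD (a0 :: a1 :: a2 :: ta) 2 0 = a2 := by simp [pysem]
  have gb0 : PySem.List.pyGetD (b0 :: b1 :: b2 :: tb) 0 0 = b0 := by simp [pysem]
  have gb1 : PySem.List.pyGetD (b0 :: b1 :: b2 :: tb) 1 0 = b1 := by simp [pysem]
  have gb2 : PySem.List.pyGetD (b0 :: b1 :: b2 :: tb) 2 0 = b2 := by simp [pysem]
  simp only [generate_classical_expression, generate_classical_expression_alt, hr6, hr3]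
  simp only [pv_stepA, pv_stepB]
  simp only [pv_foldl_add5]
  simp only [pv_guardB]
  simp only [pv_foldl_add5]
  simp only [List.map_cons, List.map_nil, List.sum_cons, List.sum_nil,
    show PySem.Int.floordiv 0 2 = 0 from by decide, show PySem.Int.floordiv 1 2 = 0 from by decide,
    show PySem.Int.floordiv 2 2 = 1 from by decide, show PySem.Int.floordiv 3 2 = 1 from by decide,
    show PySem.Int.floordiv 4 2 = 2 from by decide, show PySem.Int.floordiv 5 2 = 2 from by decide,
    show PySem.Int.mod 0 2 = 0 from by decide, show PySem.Int.mod 1 2 = 1 from by decide,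
    show PySem.Int.mod 2 2 = 0 from by decide, show PySem.Int.mod 3 2 = 1 from by decide,
    show PySem.Int.mod 4 2 = 0 from by decide, show PySem.Int.mod 5 2 = 1 from by decide,
    ga0, ga1, ga2, gb0, gb1, gb2]
  norm_num
  have tri : ∀ v : Int, v = 0 ∨ v = 1 ∨ (¬v = 0 ∧ ¬v = 1) := by intro v; omega
  rcases tri a0 with rfl | rfl | ⟨h1, h2⟩ <;>
    rcases tri a1 with rfl | rfl | ⟨h3, h4⟩ <;>
      rcases tri a2 with rfl | rfl | ⟨h5, h6⟩ <;>
        (try simp_all [pvCls_eq0 b0, pvCls_eq0 b1, pvCls_eq0 b2,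
          pvCls_eq1 b0, pvCls_eq1 b1, pvCls_eq1 b2,
          pvCls_eq0' b0, pvCls_eq0' b1, pvCls_eq0' b2,
          pvCls_eq1' b0, pvCls_eq1' b1, pvCls_eq1' b2]) <;>
        (generalize pvCls b0 = e0; generalize pvCls b1 = e1; generalize pvCls b2 = e2;
         revert e0 e1 e2; decide)

-- when no Alice entry is 0 or 1, both programs count nothing and never look at B
set_option maxHeartbeats 1000000 in
theorem gce_other (a0 a1 a2 : Int) (ta B : List Int)
    (h1 : ¬a0 = 0) (h2 : ¬a0 = 1) (h3 : ¬a1 = 0) (h4 : ¬a1 = 1)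
    (h5 : ¬a2 = 0) (h6 : ¬a2 = 1) :
    generate_classical_expression (a0 :: a1 :: a2 :: ta) B = (0, 0, 0, 0, 0) ∧
      generate_classical_expression_alt (a0 :: a1 :: a2 :: ta) B = (0, 0, 0, 0, 0) := by
  have hr6 : PySem.List.pyRange 0 (2 * (2 + 1)) 1 = [0, 1, 2, 3, 4, 5] := by decide
  have hr3 : PySem.List.pyRange 0 3 1 = [0, 1, 2] := by decide
  have ga0 : PySem.List.pyGetD (a0 :: a1 :: a2 :: ta) 0 0 = a0 := by simp [pysem]
  have ga1 : PySem.List.pyGetD (a0 :: a1 :: a2 :: ta) 1 0 = a1 := by simp [pysem]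
  have ga2 : PySem.List.pyGetD (a0 :: a1 :: a2 :: ta) 2 0 = a2 := by simp [pysem]
  constructor <;>
  · simp only [generate_classical_expression, generate_classical_expression_alt, hr6, hr3]
    simp only [pv_stepA, pv_stepB]
    simp only [pv_foldl_add5]
    try simp only [pv_guardB]
    try simp only [pv_foldl_add5]
    try simp only [List.map_cons, List.map_nil, List.sum_cons, List.sum_nil,
      show PySem.Int.floordiv 0 2 = 0 from by decide, show PySem.Int.floordiv 1 2 = 0 from by decide,
      show PySem.Int.floordiv 2 2 = 1 from by decide, show PySem.Int.floordiv 3 2 = 1 from by decide,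
      show PySem.Int.floordiv 4 2 = 2 from by decide, show PySem.Int.floordiv 5 2 = 2 from by decide,
      show PySem.Int.mod 0 2 = 0 from by decide, show PySem.Int.mod 1 2 = 1 from by decide,
      show PySem.Int.mod 2 2 = 0 from by decide, show PySem.Int.mod 3 2 = 1 from by decide,
      show PySem.Int.mod 4 2 = 0 from by decide, show PySem.Int.mod 5 2 = 1 from by decide,
      ga0, ga1, ga2]
    simp_all

-- ===== VERDICT (by name: the statement is the Claim_ definition above) =====
theorem generate_classical_expression_spec : Claim_equal_generate_classical_expression := by
  intro A B _ hpre
  obtain ⟨a0, a1, a2, ta, rfl⟩ : ∃ a0 a1 a2 t, A = a0 :: a1 :: a2 :: t := by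
    match A, hpre.1 with
    | x :: y :: z :: t, _ => exact ⟨x, y, z, t, rfl⟩
  rcases hpre.2 with hB | hother
  · obtain ⟨b0, b1, b2, tb, rfl⟩ : ∃ b0 b1 b2 t, B = b0 :: b1 :: b2 :: t := by
      match B, hB with
      | x :: y :: z :: t, _ => exact ⟨x, y, z, t, rfl⟩
    exact gce_key a0 a1 a2 b0 b1 b2 ta tb
  · simp only [List.getD_cons_zero, List.getD_cons_succ, not_or] at hother
    obtain ⟨⟨h1, h2⟩, ⟨h3, h4⟩, ⟨h5, h6⟩⟩ := hother
    have h := gce_other a0 a1 a2 ta B h1 h2 h3 h4 h5 h6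
    unfold Spec_generate_classical_expression
    rw [h.1, h.2]
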